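-- pv_equiv track=rewrite | github.com/pietroppeter/AdventOfCode2018 | python/day02.py | solve
-- ===== SOURCE A (Python) =====
-- from collections import Counter
--
-- def count23(id):
--     count = Counter(id)
--     exactly_two = bool({k for k, v in count.items() if v == 2})
--     exactly_three = bool({k for k, v in count.items() if v == 3})
--     return exactly_two, exactly_three
--
-- def solve(ids):
--     twos = 0
--     threes = 0
--     for id in ids:
--         two, three = count23(id)
--         twos += two
--         threes += three
--     return twos, threes
-- ===== SOURCE B (Python) =====
-- def same_prefix_len(cs, c):
--     k = 0
--     while k < len(cs) and cs[k] == c: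
--         k += 1
--     return k
--
-- def run_lengths(cs):
--     # cs must be sorted; returns the set of lengths of its maximal equal runs
--     if not cs:
--         return set()
--     k = same_prefix_len(cs, cs[0])
--     return {k} | run_lengths(cs[k:])
--
-- def solve(ids):
--     twos = 0
--     threes = 0
--     for s in ids:
--         lengths = run_lengths(sorted(s))
--         twos += 2 in lengths
--         threes += 3 in lengths
--     return twos, threes
-- ===== Notes on version B (the rewrite author's own statement) =====
-- stated objective: alternative
-- what changed: Replaces the Counter hash-multiset plus set-comprehension filters with a sort-then-scan-runs algorithm: each id's characters are sorted, maximal equal runs are measured by a recursive prefix scan, and the set of run lengths is tested for membership of 2 and 3.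
import Mathlib
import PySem

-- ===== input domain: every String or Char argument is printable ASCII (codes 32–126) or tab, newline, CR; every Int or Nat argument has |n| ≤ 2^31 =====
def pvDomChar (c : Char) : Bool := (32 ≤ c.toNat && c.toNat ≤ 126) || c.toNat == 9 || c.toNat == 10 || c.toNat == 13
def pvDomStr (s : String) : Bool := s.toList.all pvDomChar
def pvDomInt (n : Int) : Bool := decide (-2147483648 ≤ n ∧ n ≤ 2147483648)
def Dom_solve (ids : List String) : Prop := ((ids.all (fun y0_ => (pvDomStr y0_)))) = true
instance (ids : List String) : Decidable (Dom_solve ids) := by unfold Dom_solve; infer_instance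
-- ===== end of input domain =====

-- B replaces the Counter/set-comprehension helper with a sort-then-scan-runs algorithm (alternative; not faster).


-- ===== PORT A =====
def count23 (id : String) : Bool × Bool :=
  let count := PySem.Dict.counter id.toList
  let exactly_two :=
    !(PySem.Set.ofList ((count.items.filter (fun kv => kv.2 == 2)).map (fun kv => kv.1))).isEmpty
  let exactly_three :=
    !(PySem.Set.ofList ((count.items.filter (fun kv => kv.2 == 3)).map (fun kv => kv.1))).isEmpty
  (exactly_two, exactly_three)

def solve (ids : List String) : Int × Int :=
  ids.foldl (fun (acc : Int × Int) id =>
      let tt := count23 id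
      (acc.1 + (if tt.1 then 1 else 0), acc.2 + (if tt.2 then 1 else 0)))
    (0, 0)

-- ===== PORT B =====
-- the 'while k < len(cs) and cs[k] == c: k += 1' scan of Source B
def samePrefixLen : List Char → Char → Nat
  | [], _ => 0
  | x :: rest, c => if x == c then samePrefixLen rest c + 1 else 0

-- recursive run-length collector of Source B: {k} | run_lengths(cs[k:])
def runLengths (cs : List Char) : PySem.Set Nat :=
  match cs with
  | [] => PySem.Set.empty
  | c :: rest =>
    let k := samePrefixLen (c :: rest) c
    PySem.Set.union (PySem.Set.ofList [k]) (runLengths ((c :: rest).drop k))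
termination_by cs.length
decreasing_by simp [samePrefixLen]

def solve_alt (ids : List String) : Int × Int :=
  ids.foldl (fun (acc : Int × Int) s =>
      let lengths := runLengths (PySem.List.sorted s.toList (fun x => x) false)
      (acc.1 + (if PySem.Set.contains lengths 2 then 1 else 0),
       acc.2 + (if PySem.Set.contains lengths 3 then 1 else 0)))
    (0, 0)

-- ===== PRECONDITION & SPEC =====
def Spec_solve (ids : List String) (out : Int × Int) : Prop := out = solve_alt ids
instance (ids : List String) (out : Int × Int) : Decidable (Spec_solve ids out) := by unfold Spec_solve; infer_instance

-- ===== CLAIM (what is proved, stated in full; the proofs are below) =====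
def Claim_equal_solve : Prop := ∀ (ids : List String), Dom_solve ids → Spec_solve ids (solve ids)

-- ===== LEMMAS AND PROOFS =====

-- A's flag for multiplicity n is 'some character occurs exactly n times'
lemma flag_eq (xs : List Char) (n : Nat) :
    (!(PySem.Set.ofList (((PySem.Dict.counter xs).items.filter (fun kv => kv.2 == (n : Int))).map (fun kv => kv.1))).isEmpty)
      = decide (∃ c ∈ xs, xs.count c = n) := by
  rw [Bool.eq_iff_iff]
  simp [PySem.Dict.items_counter, List.eq_nil_iff_forall_not_mem,
        PySem.Set.mem_ofList, List.mem_map, List.mem_filter]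

lemma samePrefixLen_eq_takeWhile (l : List Char) (c : Char) :
    samePrefixLen l c = (l.takeWhile (· == c)).length := by
  induction l with
  | nil => simp [samePrefixLen]
  | cons x rest ih =>
    by_cases h : x = c <;> simp [samePrefixLen, List.takeWhile_cons, h, ih]

lemma dropWhile_gt (l : List Char) (c : Char) (hp : l.Pairwise (· ≤ ·))
    (hle : ∀ y ∈ l, c ≤ y) :
    ∀ x ∈ l.dropWhile (· == c), c < x := by
  induction l with
  | nil => simp
  | cons a rest ih =>
    intro x hx
    rw [List.dropWhile_cons] at hx
    rcases List.pairwise_cons.1 hp with ⟨ha, hrest⟩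
    by_cases h : a = c
    · simp [h] at hx
      exact ih hrest (fun y hy => h ▸ ha y hy) x hx
    · simp [h] at hx
      have hca : c < a := lt_of_le_of_ne (hle a (by simp)) (fun e => h e.symm)
      rcases hx with rfl | hx
      · exact hca
      · exact lt_of_lt_of_le hca (ha x hx)

-- key lemma: on a sorted list, the run lengths are exactly the character multiplicities
lemma mem_runLengths (cs : List Char) (hp : cs.Pairwise (· ≤ ·)) (n : Nat) :
    n ∈ runLengths cs ↔ ∃ c ∈ cs, cs.count c = n := by
  induction hlen : cs.length using Nat.strong_induction_on generalizing cs with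
  | _ m ih =>
  cases cs with
  | nil => rw [runLengths]; simp [PySem.Set.empty]
  | cons c rest =>
    rcases List.pairwise_cons.1 hp with ⟨hcle, hrestp⟩
    set t := rest.takeWhile (· == c) with ht
    set d := rest.dropWhile (· == c) with hd
    have hsplit : t ++ d = rest := List.takeWhile_append_dropWhile ..
    have hk : samePrefixLen (c :: rest) c = t.length + 1 := by
      simp [samePrefixLen, samePrefixLen_eq_takeWhile, ht]
    have hdrop : (c :: rest).drop (t.length + 1) = d := by
      simpa [← hsplit] using List.drop_left t d
    have htc : ∀ x ∈ t, x = c := fun x hx => by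
      simpa using List.mem_takeWhile_imp (l := rest) (p := (· == c)) hx
    have hdgt : ∀ x ∈ d, c < x := dropWhile_gt rest c hrestp hcle
    have hdp : d.Pairwise (· ≤ ·) := hrestp.sublist (List.dropWhile_sublist _)
    have hcount_c : (c :: rest).count c = t.length + 1 := by
      have h1 : t.count c = t.length := List.count_eq_length.2 (fun x hx => by simp [htc x hx])
      have h2 : d.count c = 0 := List.count_eq_zero.2 (fun hmem => lt_irrefl c (hdgt c hmem))
      simp [← hsplit, List.count_append, List.count_cons, h1, h2]
    have hcount_d : ∀ x ∈ d, (c :: rest).count x = d.count x := by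
      intro x hx
      have hxc : x ≠ c := fun e => lt_irrefl c (e ▸ hdgt x hx)
      have h1 : t.count x = 0 := List.count_eq_zero.2 (fun hm => hxc (htc x hm))
      simp [← hsplit, List.count_append, List.count_cons, h1, Ne.symm hxc]
    have hdlt : d.length < m := by
      have h2 : d.length ≤ rest.length := by
        rw [hd]; exact List.Sublist.length_le (List.dropWhile_sublist _)
      simp at hlen; omega
    have ihd := ih d.length hdlt d hdp rfl
    rw [runLengths.eq_def]
    simp only [hk, hdrop, PySem.Set.mem_union, PySem.Set.mem_ofList, List.mem_singleton, hk, ihd]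
    constructor
    · rintro (rfl | ⟨x, hx, hcnt⟩)
      · exact ⟨c, by simp, hcount_c⟩
      · have hxrest : x ∈ rest := by
          rw [← hsplit]; exact List.mem_append_right _ hx
        exact ⟨x, by simp [hxrest], (hcount_d x hx).trans hcnt⟩
    · rintro ⟨x, hx, hcnt⟩
      by_cases hxc : x = c
      · left; rw [hxc] at hcnt; omega
      · right
        have hxrest : x ∈ rest := by
          rcases List.mem_cons.1 hx with rfl | h
          · exact absurd rfl hxc
          · exact h
        have hxd : x ∈ d := by
          rw [← hsplit] at hxrest
          rcases List.mem_append.1 hxrest with h | h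
          · exact absurd (htc x h) hxc
          · exact h
        exact ⟨x, hxd, (hcount_d x hxd).symm.trans hcnt⟩

-- per-string bridge: B's run-length membership equals A's flag
lemma contains_runLengths_sorted (xs : List Char) (n : Nat) :
    PySem.Set.contains (runLengths (PySem.List.sorted xs (fun x => x) false)) n
      = decide (∃ c ∈ xs, xs.count c = n) := by
  have hperm : (PySem.List.sorted xs (fun x => x) false).Perm xs := PySem.List.sorted_perm ..
  have hp : (PySem.List.sorted xs (fun x => x) false).Pairwise (· ≤ ·) := by
    simpa using PySem.List.sorted_pairwise xs (fun x => x)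
  rw [Bool.eq_iff_iff]
  simp only [PySem.Set.contains, List.contains_iff_mem, decide_eq_true_eq]
  rw [mem_runLengths _ hp n]
  constructor <;> rintro ⟨c, hc, hcnt⟩
  · exact ⟨c, hperm.mem_iff.1 hc, (hperm.count_eq c).symm.trans hcnt⟩
  · exact ⟨c, hperm.mem_iff.2 hc, (hperm.count_eq c).trans hcnt⟩

lemma count23_eq (s : String) :
    count23 s = (PySem.Set.contains (runLengths (PySem.List.sorted s.toList (fun x => x) false)) 2,
                 PySem.Set.contains (runLengths (PySem.List.sorted s.toList (fun x => x) false)) 3) := by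
  unfold count23
  refine Prod.ext ?_ ?_ <;> simp only []
  · rw [contains_runLengths_sorted]
    have := flag_eq s.toList 2
    simpa using this
  · rw [contains_runLengths_sorted]
    have := flag_eq s.toList 3
    simpa using this

lemma foldl_eq (ids : List String) (a b : Int) :
    ids.foldl (fun (acc : Int × Int) id =>
        let tt := count23 id
        (acc.1 + (if tt.1 then 1 else 0), acc.2 + (if tt.2 then 1 else 0))) (a, b)
      = ids.foldl (fun (acc : Int × Int) s =>
          let lengths := runLengths (PySem.List.sorted s.toList (fun x => x) false)
          (acc.1 + (if PySem.Set.contains lengths 2 then 1 else 0),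
           acc.2 + (if PySem.Set.contains lengths 3 then 1 else 0))) (a, b) := by
  simp only [count23_eq]

-- ===== VERDICT (by name: the statement is the Claim_ definition above) =====
theorem solve_spec : Claim_equal_solve := by
  intro ids _
  exact foldl_eq ids 0 0
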